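-- pv_equiv track=rewrite | github.com/Ipetr14/MDGD_code_brute_force | brute_force.py | get_equation_positions
-- ===== SOURCE A (Python) =====
-- def get_equation_positions(tokens, marker_equation_ids, marker_is_display):
--     """
--     Get the token position of each equation occurrence in the text.
--
--     Args:
--         tokens (list[str]): tokenized article text containing `MATHMARKER`
--             placeholders.
--         marker_equation_ids (list[str]): equation IDs in the order they were
--             replaced by markers during parsing.
--         marker_is_display (list[bool]): flags indicating whether each marker
--             corresponds to a display equation.
--
--     Returns:
--         list[tuple[str, int, bool]]: stores one tuple per equation occurrence
--             with the equation ID, token index, and display-equation flag.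
--     """
--     token_pos = 0
--     marker_pos = 0
--     equation_occurrences = []
--
--     for token in tokens:
--         if token == "MATHMARKER":
--             if marker_pos >= len(marker_equation_ids):
--                 raise ValueError("More MATHMARKER tokens found than recorded equation markers.")
--             equation_occurrences.append(
--                 (marker_equation_ids[marker_pos], token_pos, marker_is_display[marker_pos])
--             )
--             marker_pos += 1
--
--         token_pos += 1
--
--     if marker_pos != len(marker_equation_ids):
--         raise ValueError("Recorded equation markers do not match parsed MATHMARKER tokens.")
--
--     return equation_occurrences
-- ===== SOURCE B (Python) =====
-- def get_equation_positions(tokens, marker_equation_ids, marker_is_display):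
--     """Search-driven pairing: iterate over the recorded equation ids and locate
--     each one's MATHMARKER token with list.index from a moving start offset,
--     instead of scanning every token with marker counters."""
--     equation_occurrences = []
--     start = 0
--     for k in range(len(marker_equation_ids)):
--         try:
--             pos = tokens.index("MATHMARKER", start)
--         except ValueError:
--             raise ValueError("Recorded equation markers do not match parsed MATHMARKER tokens.")
--         equation_occurrences.append(
--             (marker_equation_ids[k], pos, marker_is_display[k])
--         )
--         start = pos + 1
--     if "MATHMARKER" in tokens[start:]:
--         raise ValueError("More MATHMARKER tokens found than recorded equation markers.")
--     return equation_occurrences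
-- ===== Notes on version B (the rewrite author's own statement) =====
-- stated objective: alternative
-- what changed: Replaces A's single scan over every token with three mutable counters by a loop driven by the equation-id list that locates each marker with list.index from a moving start offset, plus one trailing membership check for surplus markers.
import Mathlib
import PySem

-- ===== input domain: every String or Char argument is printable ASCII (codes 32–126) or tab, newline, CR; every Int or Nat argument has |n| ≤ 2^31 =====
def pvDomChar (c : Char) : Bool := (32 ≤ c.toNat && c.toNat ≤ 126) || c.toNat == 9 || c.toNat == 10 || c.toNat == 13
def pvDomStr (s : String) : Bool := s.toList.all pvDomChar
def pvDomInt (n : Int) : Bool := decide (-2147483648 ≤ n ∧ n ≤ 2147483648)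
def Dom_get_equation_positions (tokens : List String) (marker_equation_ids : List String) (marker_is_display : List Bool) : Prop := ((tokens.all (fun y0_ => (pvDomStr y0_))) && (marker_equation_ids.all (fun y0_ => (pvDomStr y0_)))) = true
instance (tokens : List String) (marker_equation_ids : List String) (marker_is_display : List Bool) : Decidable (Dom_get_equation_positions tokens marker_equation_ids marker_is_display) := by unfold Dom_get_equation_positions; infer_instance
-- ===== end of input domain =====

-- B replaces A's scan over every token (three mutable counters) with a loop driven by the
-- equation-id list that locates each marker via list.index from a moving start offset
-- (objective: alternative). Equivalence of RETURN values on Pre_ (where A raises no exception).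

-- ===== PORT A =====
-- A's loop: state = (token_pos, marker_pos, equation_occurrences); indexing is in range on Pre_.
def get_equation_positions (tokens : List String) (marker_equation_ids : List String) (marker_is_display : List Bool) : List (String × Int × Bool) :=
  (tokens.foldl
    (fun (st : Int × Nat × List (String × Int × Bool)) token =>
      if token == "MATHMARKER" then
        (st.1 + 1, st.2.1 + 1,
          st.2.2 ++ [(marker_equation_ids.getD st.2.1 "", st.1, marker_is_display.getD st.2.1 false)])
      else (st.1 + 1, st.2.1, st.2.2))
    (0, 0, [])).2.2

-- ===== PORT B =====
-- tokens.index("MATHMARKER", start): scan from offset `start`, absolute index; none = ValueError.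
def pvFindFrom (tokens : List String) (start : Nat) : Option Nat :=
  (PySem.List.index? (tokens.drop start) "MATHMARKER").map (· + start)

-- B: for k in range(len(ids)): pos = tokens.index("MATHMARKER", start); append; start = pos+1;
-- then the trailing `"MATHMARKER" in tokens[start:]` check. The two `raise` branches (the
-- `except ValueError` re-raise = state none, and the trailing check) lie outside Pre_; the
-- port returns [] there.
def get_equation_positions_alt (tokens : List String) (marker_equation_ids : List String) (marker_is_display : List Bool) : List (String × Int × Bool) :=
  let st := (List.range marker_equation_ids.length).foldl
    (fun (st : Option (List (String × Int × Bool) × Nat)) k =>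
      st.bind (fun os =>
        (pvFindFrom tokens os.2).map (fun (pos : Nat) =>
          (os.1 ++ [(marker_equation_ids.getD k "", (pos : Int), marker_is_display.getD k false)],
           pos + 1))))
    (some ([], 0))
  match st with
  | some os => if (tokens.drop os.2).contains "MATHMARKER" then [] else os.1
  | none => []

-- ===== PRECONDITION & SPEC =====
-- Pre_ = exactly the inputs where A raises nothing: the number of MATHMARKER tokens equals the
-- number of recorded ids (else ValueError) and the display-flag list is long enough (else IndexError).
def Pre_get_equation_positions (tokens : List String) (marker_equation_ids : List String) (marker_is_display : List Bool) : Prop :=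
  tokens.count "MATHMARKER" = marker_equation_ids.length ∧
  marker_equation_ids.length ≤ marker_is_display.length
instance (tokens : List String) (marker_equation_ids : List String) (marker_is_display : List Bool) : Decidable (Pre_get_equation_positions tokens marker_equation_ids marker_is_display) := by unfold Pre_get_equation_positions; infer_instance

def pvWitness_get_equation_positions : List String × List String × List Bool :=
  (["a", "MATHMARKER", "b", "MATHMARKER"], ["eq1", "eq2"], [true, false])

def Spec_get_equation_positions (tokens : List String) (marker_equation_ids : List String) (marker_is_display : List Bool) (out : List (String × Int × Bool)) : Prop := out = get_equation_positions_alt tokens marker_equation_ids marker_is_display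
instance (tokens : List String) (marker_equation_ids : List String) (marker_is_display : List Bool) (out : List (String × Int × Bool)) : Decidable (Spec_get_equation_positions tokens marker_equation_ids marker_is_display out) := by unfold Spec_get_equation_positions; infer_instance

-- ===== CLAIM =====
def Claim_equal_get_equation_positions : Prop := ∀ (tokens : List String) (marker_equation_ids : List String) (marker_is_display : List Bool), Dom_get_equation_positions tokens marker_equation_ids marker_is_display → Pre_get_equation_positions tokens marker_equation_ids marker_is_display → Spec_get_equation_positions tokens marker_equation_ids marker_is_display (get_equation_positions tokens marker_equation_ids marker_is_display)

-- ===== LEMMAS AND PROOFS =====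

-- absolute positions (from offset i) of the MATHMARKER tokens
def pvOccs : List String → Nat → List Nat
  | [], _ => []
  | t :: ts, i => if t == "MATHMARKER" then i :: pvOccs ts (i + 1) else pvOccs ts (i + 1)

-- the common canonical result: k-th position paired with ids[k], disp[k]
def pvCanon (ids : List String) (disp : List Bool) : List Nat → Nat → List (String × Int × Bool)
  | [], _ => []
  | p :: ps, k => (ids.getD k "", (p : Int), disp.getD k false) :: pvCanon ids disp ps (k + 1)

theorem pvOccs_length (ts : List String) : ∀ i, (pvOccs ts i).length = ts.count "MATHMARKER" := by
  induction ts with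
  | nil => intro i; simp [pvOccs]
  | cons t ts ih =>
      intro i
      by_cases h : t == "MATHMARKER" <;>
        simp [pvOccs, h, List.count_cons, ih]

-- A's fold equals the canonical result
theorem pvA_eq_canon (ids : List String) (disp : List Bool) :
    ∀ (ts : List String) (i : Nat) (mp : Nat) (acc : List (String × Int × Bool)),
      (ts.foldl
        (fun (st : Int × Nat × List (String × Int × Bool)) token =>
          if token == "MATHMARKER" then
            (st.1 + 1, st.2.1 + 1, st.2.2 ++ [(ids.getD st.2.1 "", st.1, disp.getD st.2.1 false)])
          else (st.1 + 1, st.2.1, st.2.2))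
        ((i : Int), mp, acc)).2.2 = acc ++ pvCanon ids disp (pvOccs ts i) mp := by
  intro ts
  induction ts with
  | nil => intro i mp acc; simp [pvOccs, pvCanon]
  | cons t ts ih =>
      intro i mp acc
      rw [List.foldl_cons]
      by_cases h : t == "MATHMARKER"
      · rw [if_pos h]
        have : ((i : Int) + 1) = ((i + 1 : Nat) : Int) := by push_cast; ring
        rw [this, ih]
        simp [pvOccs, pvCanon, h, List.append_assoc]
      · rw [if_neg h]
        have : ((i : Int) + 1) = ((i + 1 : Nat) : Int) := by push_cast; ring
        rw [this, ih]
        simp [pvOccs, h]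

-- index search = head of the position list
theorem pvFind_head (ts : List String) : ∀ s : Nat,
    (PySem.List.index? ts "MATHMARKER").map (· + s) = (pvOccs ts s).head? := by
  induction ts with
  | nil => intro s; simp [PySem.List.index?, pvOccs, List.idxOf?]
  | cons t ts ih =>
      intro s
      by_cases h : t == "MATHMARKER"
      · have ht : t = "MATHMARKER" := by simpa [beq_iff_eq] using h
        subst ht
        rw [PySem.List.index?_cons_self]
        simp [pvOccs]
      · have ht : t ≠ "MATHMARKER" := by simpa [beq_iff_eq] using h
        rw [PySem.List.index?_cons_of_ne ts ht]
        have := ih (s + 1)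
        simp only [pvOccs, h, if_neg, Bool.false_eq_true, if_false]
        rw [← this, Option.map_map]
        congr 1
        funext j
        simp; omega

-- consuming the head position r moves the suffix/offset to r + 1
theorem pvOccs_drop (ts : List String) : ∀ (i r : Nat) (rs : List Nat),
    pvOccs ts i = r :: rs → i ≤ r ∧ pvOccs (ts.drop (r + 1 - i)) (r + 1) = rs := by
  induction ts with
  | nil => intro i r rs h; simp [pvOccs] at h
  | cons t ts ih =>
      intro i r rs h
      by_cases hm : t == "MATHMARKER"
      · simp only [pvOccs, hm, if_pos] at h
        obtain ⟨h1, h2⟩ := List.cons.injEq .. ▸ h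
        subst h1
        refine ⟨le_refl _, ?_⟩
        have : i + 1 - i = 1 := by omega
        rw [this]
        simpa using h2.symm ▸ rfl
      · simp only [pvOccs, hm, Bool.false_eq_true, if_false] at h
        obtain ⟨hle, hdrop⟩ := ih (i + 1) r rs h
        refine ⟨by omega, ?_⟩
        have h1 : r + 1 - i = (r + 1 - (i + 1)) + 1 := by omega
        rw [h1, List.drop_succ_cons] at *
        exact hdrop

-- the loop invariant for B's fold over range' k m
theorem pvB_loop (tokens ids : List String) (disp : List Bool) :
    ∀ (m k s : Nat) (out : List (String × Int × Bool)) (ps : List Nat),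
      pvOccs (tokens.drop s) s = ps → m ≤ ps.length →
      ∃ s', ((List.range' k m).foldl
        (fun (st : Option (List (String × Int × Bool) × Nat)) k =>
          st.bind (fun os =>
            (pvFindFrom tokens os.2).map (fun (pos : Nat) =>
              (os.1 ++ [(ids.getD k "", (pos : Int), disp.getD k false)], pos + 1))))
        (some (out, s))) = some (out ++ pvCanon ids disp (ps.take m) k, s') ∧
        pvOccs (tokens.drop s') s' = ps.drop m := by
  intro m
  induction m with
  | zero =>
      intro k s out ps hps _
      exact ⟨s, by simp [pvCanon], by simpa using hps⟩
  | succ m ih =>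
      intro k s out ps hps hlen
      obtain ⟨r, rs, rfl⟩ : ∃ r rs, ps = r :: rs := by
        cases ps with
        | nil => simp at hlen
        | cons a b => exact ⟨a, b, rfl⟩
      have hfind : pvFindFrom tokens s = some r := by
        unfold pvFindFrom
        rw [pvFind_head, hps]
        rfl
      obtain ⟨hle, hnext⟩ := pvOccs_drop (tokens.drop s) s r rs hps
      have hdd : (tokens.drop s).drop (r + 1 - s) = tokens.drop (r + 1) := by
        rw [List.drop_drop]; congr 1; omega
      rw [hdd] at hnext
      rw [List.range'_succ, List.foldl_cons]
      simp only [Option.bind_some, hfind, Option.map_some]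
      obtain ⟨s', hfold, hocc⟩ := ih (k + 1) (r + 1)
        (out ++ [(ids.getD k "", (r : Int), disp.getD k false)]) rs hnext (by simpa using hlen)
      refine ⟨s', ?_, by simpa using hocc⟩
      rw [hfold]
      simp [pvCanon, List.append_assoc]

-- ===== VERDICT =====
theorem get_equation_positions_spec : Claim_equal_get_equation_positions := by
  intro tokens ids disp _ hpre
  unfold Spec_get_equation_positions get_equation_positions get_equation_positions_alt
  have hA := pvA_eq_canon ids disp tokens 0 0 []
  simp only [Nat.cast_zero] at hA
  rw [hA, List.nil_append]
  set ps := pvOccs tokens 0 with hps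
  have hlen : ps.length = ids.length := by
    rw [hps, pvOccs_length]; exact hpre.1
  have hocc0 : pvOccs (tokens.drop 0) 0 = ps := by simpa using hps.symm
  obtain ⟨s', hfold, hocc⟩ := pvB_loop tokens ids disp ids.length 0 0 [] ps hocc0 (le_of_eq hlen.symm)
  rw [List.range_eq_range', hfold]
  have htake : ps.take ids.length = ps := by rw [← hlen]; simp
  have hdrop : ps.drop ids.length = [] := by rw [← hlen]; simp
  rw [hdrop] at hocc
  have hnomark : (tokens.drop s').contains "MATHMARKER" = false := by
    have : (tokens.drop s').count "MATHMARKER" = 0 := by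
      rw [← pvOccs_length (tokens.drop s') s', hocc]; rfl
    simp only [List.count_eq_zero] at this
    simpa using this
  simp [htake]
  intro h
  simp [h] at hnomark
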